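-- pv_equiv track=rewrite | github.com/val260/podv2 | old_transcript/utils3.py | merge_seg
-- ===== SOURCE A (Python) =====
-- def merge_seg(seg_list, data):
--     res = []
--     start, to_merge = False, False
--     speech_begin, speech_end = 0, 0
--     for i in range(len(seg_list) - 1):
--         start_cur, end_cur = seg_list[i][0], seg_list[i][1]
--         start_next, end_next = seg_list[i+1][0], seg_list[i+1][1]
--         if start_next - end_cur <= 1:
--             speech_end = end_next
--         if start_next - end_cur <= 1 and not start:
--             start = True
--             speech_begin = start_cur
--         elif start_next - end_cur > 1 and start:
--             to_merge = True
--         if start and to_merge: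
--             start, to_merge = False, False
--             res.append((speech_begin, speech_end))
--         elif not start:
--             res.append(seg_list[i])
--     if start:
--         res.append((speech_begin, speech_end))
--     if seg_list and not start:
--         res.append(seg_list[len(seg_list) - 1])
--     return res
-- ===== SOURCE B (Python) =====
-- def split_runs(seg_list):
--     """Stage 1: partition seg_list into maximal runs of segments whose
--     consecutive gap is at most 1 (split wherever gap > 1)."""
--     runs = []
--     for seg in seg_list:
--         if runs and seg[0] - runs[-1][-1][1] <= 1:
--             runs[-1].append(seg)
--         else:
--             runs.append([seg])
--     return runs
--
-- def merge_seg(seg_list, data):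
--     """Stage 2: collapse each run; a run of one keeps its original segment,
--     a longer run becomes (first begin, last end)."""
--     return [r[0] if len(r) == 1 else (r[0][0], r[-1][1])
--             for r in split_runs(seg_list)]
-- ===== Notes on version B (the rewrite author's own statement) =====
-- stated objective: alternative
-- what changed: Replaces A's single indexed pass with start/to_merge flag state by a two-stage algorithm: first partition the list into maximal runs split at gaps > 1, then a second pass collapses each run (singleton runs keep their original segment, longer runs become (first begin, last end)).
import Mathlib
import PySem

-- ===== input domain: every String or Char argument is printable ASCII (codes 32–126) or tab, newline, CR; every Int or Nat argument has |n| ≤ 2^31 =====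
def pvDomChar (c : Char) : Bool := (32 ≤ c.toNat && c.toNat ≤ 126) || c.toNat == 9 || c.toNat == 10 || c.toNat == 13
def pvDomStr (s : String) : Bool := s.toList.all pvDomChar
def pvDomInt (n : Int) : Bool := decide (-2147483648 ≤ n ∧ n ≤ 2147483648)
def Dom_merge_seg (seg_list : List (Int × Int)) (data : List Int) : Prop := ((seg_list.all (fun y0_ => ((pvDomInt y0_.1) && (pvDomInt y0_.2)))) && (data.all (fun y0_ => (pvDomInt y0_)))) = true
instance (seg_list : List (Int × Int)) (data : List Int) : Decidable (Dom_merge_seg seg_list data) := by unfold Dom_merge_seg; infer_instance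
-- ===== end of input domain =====

-- B replaces A's single flag-machine pass by a two-stage algorithm (partition into runs at
-- gaps > 1, then collapse each run): alternative decomposition, same O(n) cost.

-- ===== PORT A =====
-- A's loop 'for i in range(len(seg_list)-1)' reads seg_list[i] and seg_list[i+1]; ported as the
-- obvious recursion over adjacent elements, carrying the same state (res, start, to_merge, speech_begin, speech_end).
def mergeSegLoopA : List (Int × Int) → List (Int × Int) → Bool → Bool → Int → Int →
    (List (Int × Int) × Bool × Bool × Int × Int)
  | c :: n :: rest, res, start, to_merge, sb, se =>
    let se := if n.1 - c.2 ≤ 1 then n.2 else se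
    let (start, sb, to_merge) :=
      if n.1 - c.2 ≤ 1 ∧ start = false then (true, c.1, to_merge)
      else if n.1 - c.2 > 1 ∧ start = true then (start, sb, true)
      else (start, sb, to_merge)
    let (start, to_merge, res) :=
      if start = true ∧ to_merge = true then (false, false, res ++ [(sb, se)])
      else if start = false then (start, to_merge, res ++ [c])
      else (start, to_merge, res)
    mergeSegLoopA (n :: rest) res start to_merge sb se
  | _, res, start, to_merge, sb, se => (res, start, to_merge, sb, se)

-- the two trailing 'if' statements after A's loop
def mergeSegFinishA (st : List (Int × Int) × Bool × Bool × Int × Int) (l : List (Int × Int)) :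
    List (Int × Int) :=
  let res := if st.2.1 = true then st.1 ++ [(st.2.2.2.1, st.2.2.2.2)] else st.1
  if l ≠ [] ∧ st.2.1 = false then res ++ [l.getLast?.getD (0, 0)] else res

def merge_seg (seg_list : List (Int × Int)) (_data : List Int) : List (Int × Int) :=
  mergeSegFinishA (mergeSegLoopA seg_list [] false false 0 0) seg_list

-- ===== PORT B =====
-- Stage 1 of Source B: partition into maximal runs, splitting wherever the gap is > 1
-- ('runs[-1].append(seg)' becomes dropLast ++ [last ++ [seg]]).
def splitStepB (runs : List (List (Int × Int))) (seg : Int × Int) : List (List (Int × Int)) :=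
  match runs.getLast? with
  | some r =>
    if seg.1 - (r.getLast?.getD (0, 0)).2 ≤ 1 then runs.dropLast ++ [r ++ [seg]]
    else runs ++ [[seg]]
  | none => runs ++ [[seg]]

def splitRunsB (seg_list : List (Int × Int)) : List (List (Int × Int)) :=
  seg_list.foldl splitStepB []

-- Stage 2 of Source B: the list comprehension collapsing each run
def collapseRunB (r : List (Int × Int)) : Int × Int :=
  if r.length = 1 then r.headD (0, 0) else ((r.headD (0, 0)).1, (r.getLast?.getD (0, 0)).2)

def merge_seg_alt (seg_list : List (Int × Int)) (_data : List Int) : List (Int × Int) :=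
  (splitRunsB seg_list).map collapseRunB

-- ===== PRECONDITION & SPEC =====
def Spec_merge_seg (seg_list : List (Int × Int)) (data : List Int) (out : List (Int × Int)) : Prop := out = merge_seg_alt seg_list data
instance (seg_list : List (Int × Int)) (data : List Int) (out : List (Int × Int)) : Decidable (Spec_merge_seg seg_list data out) := by unfold Spec_merge_seg; infer_instance

-- ===== CLAIM (what is proved, stated in full; the proofs are below) =====
def Claim_equal_merge_seg : Prop := ∀ (seg_list : List (Int × Int)) (data : List Int), Dom_merge_seg seg_list data → Spec_merge_seg seg_list data (merge_seg seg_list data)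

-- ===== LEMMAS AND PROOFS =====

-- proof-only intermediate form: the running-merged-interval recursion both programs compute
def mergeSegGoB : (Int × Int) → List (Int × Int) → List (Int × Int)
  | cur, [] => [cur]
  | cur, nxt :: rest =>
    if nxt.1 - cur.2 ≤ 1 then mergeSegGoB (cur.1, nxt.2) rest
    else cur :: mergeSegGoB nxt rest

-- mergeSegFinishA only looks at nonemptiness and the last element of its list argument
lemma finishA_cons_cons (st : List (Int × Int) × Bool × Bool × Int × Int)
    (c n : Int × Int) (rest : List (Int × Int)) :
    mergeSegFinishA st (c :: n :: rest) = mergeSegFinishA st (n :: rest) := by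
  simp [mergeSegFinishA]

-- A-side invariant: A's (start, speech_begin, speech_end) state tracks the running interval
lemma loop_key : ∀ (t : List (Int × Int)) (c : Int × Int) (res : List (Int × Int)) (b se : Int),
    mergeSegFinishA (mergeSegLoopA (c :: t) res false false b se) (c :: t)
      = res ++ mergeSegGoB c t
  ∧ mergeSegFinishA (mergeSegLoopA (c :: t) res true false b c.2) (c :: t)
      = res ++ mergeSegGoB (b, c.2) t := by
  intro t
  induction t with
  | nil =>
    intro c res b se
    constructor <;> simp [mergeSegLoopA, mergeSegFinishA, mergeSegGoB]
  | cons n rest ih =>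
    intro c res b se
    refine ⟨?_, ?_⟩ <;> by_cases h : n.1 - c.2 ≤ 1 <;>
      simp only [mergeSegLoopA] <;> rw [finishA_cons_cons]
    · simpa [h, mergeSegGoB] using (ih n res c.1 0).2
    · simpa [h, mergeSegGoB, show (1:Int) < n.1 - c.2 by omega] using (ih n (res ++ [c]) b se).1
    · simpa [h, mergeSegGoB, show ¬ ((1:Int) < n.1 - c.2) by omega] using (ih n res b 0).2
    · simpa [h, mergeSegGoB, show (1:Int) < n.1 - c.2 by omega] using (ih n (res ++ [(b, c.2)]) b c.2).1

-- getLast? of a cons of a concat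
lemma getLast?_cons_concat {α : Type} (a s : α) (l : List α) : (a :: (l ++ [s])).getLast? = some s := by
  rw [← List.cons_append, List.getLast?_concat]

-- B-side invariant: collapsing the runs built by the fold gives the running-interval recursion
lemma runs_key : ∀ (t : List (Int × Int)) (rs : List (List (Int × Int))) (r : List (Int × Int))
    (_ : r ≠ []),
    (List.foldl splitStepB (rs ++ [r]) t).map collapseRunB
      = rs.map collapseRunB ++ mergeSegGoB (collapseRunB r) t := by
  intro t
  induction t with
  | nil => intro rs r _; simp [mergeSegGoB]
  | cons seg rest ih =>
    intro rs r hr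
    have hcur2 : (collapseRunB r).2 = (r.getLast?.getD (0, 0)).2 := by
      rcases r with _ | ⟨a, r'⟩
      · simp at hr
      · rcases r' with _ | ⟨b, r''⟩ <;> simp [collapseRunB]
    by_cases h : seg.1 - (r.getLast?.getD (0, 0)).2 ≤ 1
    · have step : List.foldl splitStepB (rs ++ [r]) (seg :: rest)
        = List.foldl splitStepB (rs ++ [r ++ [seg]]) rest := by
        simp only [List.foldl_cons, splitStepB, List.getLast?_concat,
          List.dropLast_concat, if_pos h]
      rw [step, ih rs (r ++ [seg]) (by simp)]
      have hcoll : collapseRunB (r ++ [seg]) = ((collapseRunB r).1, seg.2) := by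
        rcases r with _ | ⟨a, r'⟩
        · simp at hr
        · rcases r' with _ | ⟨b, r''⟩ <;>
            simp [collapseRunB, getLast?_cons_concat]
      rw [hcoll]
      simp [mergeSegGoB, hcur2, h]
    · have step : List.foldl splitStepB (rs ++ [r]) (seg :: rest)
        = List.foldl splitStepB ((rs ++ [r]) ++ [[seg]]) rest := by
        simp only [List.foldl_cons, splitStepB, List.getLast?_concat, if_neg h]
      rw [step, ih (rs ++ [r]) [seg] (by simp)]
      have hsing : collapseRunB [seg] = seg := by simp [collapseRunB]
      simp [mergeSegGoB, hcur2, h, hsing]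

lemma alt_eq_go : ∀ (c : Int × Int) (t : List (Int × Int)) (data : List Int),
    merge_seg_alt (c :: t) data = mergeSegGoB c t := by
  intro c t data
  unfold merge_seg_alt splitRunsB
  have h0 : List.foldl splitStepB ([] : List (List (Int × Int))) (c :: t)
      = List.foldl splitStepB (([] : List (List (Int × Int))) ++ [[c]]) t := by
    simp [List.foldl, splitStepB]
  rw [h0, runs_key t [] [c] (by simp)]
  simp [collapseRunB]

-- ===== VERDICT (by name: the statement is the Claim_ definition above) =====
theorem merge_seg_spec : Claim_equal_merge_seg := by
  intro seg_list data _
  unfold Spec_merge_seg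
  cases seg_list with
  | nil => simp [merge_seg, merge_seg_alt, splitRunsB, mergeSegLoopA, mergeSegFinishA]
  | cons c t =>
    rw [alt_eq_go c t data]
    simpa [merge_seg] using (loop_key t c [] 0 0).1
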